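-- pv_equiv track=rewrite | github.com/einigl/latex-ism-emission-lines | ism_lines_helpers.py | molecule_and_transition
-- ===== SOURCE A (Python) =====
-- from typing import List, Tuple, Union
--
-- _molecules_to_latex = {
--     "h": "H",
--     "h2": "H_2",
--     "hd": "HD",
--     "co": "CO",
--     "13c_o": "^{13}CO",
--     "c_18o": "C^{18}O",
--     "13c_18o": "^{13}C^{18}O",
--     "c": "C",
--     "n": "N",
--     "o": "O",
--     "s": "S",
--     "si": "Si",
--     "cs": "CS",
--     "cn": "CN",
--     "hcn": "HCN",
--     "hnc": "HNC",
--     "oh": "OH",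
--     "h2o": "H_2O",
--     "h2_18o": "H_2^{18}O",
--     "c2h": "C_2H",
--     "c_c3h2": "c-C_3H_2",
--     "so": "SO",
--     "cp": "C^+",
--     "sp": "S^+",
--     "hcop": "HCO^+",
--     "chp": "CH^+",
--     "ohp": "OH^+",
--     "shp": "SH^+",
-- }
--
-- def molecule_and_transition(line_name: str) -> Tuple[str, str]:
--     """
--     Returns the raw strings of the molecule name and the transition.
--
--     Parameters
--     ----------
--     line_name : str
--         Formatted line.
--
--     Returns
--     -------
--     str
--         Raw string representing the molecule.
--     str
--         Raw string representing the transition.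
--     """
--     # Check if the input is in the good format
--     if not "_" in line_name:
--         raise ValueError(f'line_name {line_name} is not in the appropriate format molecule_transition')
--     line_name = line_name.lower().strip()
--
--     # Search for all matching prefixes
--     prefixes = [s for s in _molecules_to_latex if line_name.startswith(s)]
--     if len(prefixes) == 0:
--         return tuple(line_name.split('_', maxsplit=1))
--
--     # Select the longest prefix
--     idxmax = lambda ls: max(range(len(ls)), key=ls.__getitem__)
--     prefix = prefixes[idxmax([len(s) for s in prefixes])]
--
--     # Select the remaining suffix
--     suffix = line_name[len(prefix)+1:]
--
--     return prefix, suffix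
-- ===== SOURCE B (Python) =====
-- from typing import Tuple
--
-- _molecules_to_latex = {
--     "h": "H",
--     "h2": "H_2",
--     "hd": "HD",
--     "co": "CO",
--     "13c_o": "^{13}CO",
--     "c_18o": "C^{18}O",
--     "13c_18o": "^{13}C^{18}O",
--     "c": "C",
--     "n": "N",
--     "o": "O",
--     "s": "S",
--     "si": "Si",
--     "cs": "CS",
--     "cn": "CN",
--     "hcn": "HCN",
--     "hnc": "HNC",
--     "oh": "OH",
--     "h2o": "H_2O",
--     "h2_18o": "H_2^{18}O",
--     "c2h": "C_2H",
--     "c_c3h2": "c-C_3H_2",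
--     "so": "SO",
--     "cp": "C^+",
--     "sp": "S^+",
--     "hcop": "HCO^+",
--     "chp": "CH^+",
--     "ohp": "OH^+",
--     "shp": "SH^+",
-- }
--
-- _KEYS = frozenset(_molecules_to_latex)
-- _MAXLEN = max(map(len, _KEYS))
--
-- def molecule_and_transition(line_name: str) -> Tuple[str, str]:
--     """Longest-prefix match by hashing the input's own prefixes, longest first,
--     instead of scanning the molecule table at all."""
--     if not "_" in line_name:
--         raise ValueError(f'line_name {line_name} is not in the appropriate format molecule_transition')
--     line_name = line_name.lower().strip()
--
--     for k in range(min(len(line_name), _MAXLEN), 0, -1):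
--         if line_name[:k] in _KEYS:
--             return line_name[:k], line_name[k+1:]
--
--     return tuple(line_name.split('_', maxsplit=1))
-- ===== Notes on version B (the rewrite author's own statement) =====
-- stated objective: alternative
-- what changed: Instead of scanning the whole molecule table for matching prefixes and taking an argmax, B never iterates the table: it hashes the input's own prefixes, from the longest possible key length down, into a frozenset of keys and returns on the first hit.
import Mathlib
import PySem

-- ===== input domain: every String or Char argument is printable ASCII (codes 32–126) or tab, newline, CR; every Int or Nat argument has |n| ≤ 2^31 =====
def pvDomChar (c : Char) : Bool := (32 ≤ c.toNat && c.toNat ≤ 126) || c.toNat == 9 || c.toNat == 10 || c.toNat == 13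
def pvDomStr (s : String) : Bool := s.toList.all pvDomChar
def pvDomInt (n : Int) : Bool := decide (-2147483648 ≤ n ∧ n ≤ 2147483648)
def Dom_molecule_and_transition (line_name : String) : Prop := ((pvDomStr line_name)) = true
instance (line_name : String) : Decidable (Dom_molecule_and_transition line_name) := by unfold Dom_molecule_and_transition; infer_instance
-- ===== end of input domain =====

-- B never scans the molecule table: it looks the input's own prefixes up in a set of the keys,
-- longest possible key length first, and returns on the first hit (objective: alternative).

-- ===== PORT A =====
-- keys of _molecules_to_latex in insertion order (the values are never used by the function)
def pyMoleculeKeys : List String :=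
  ["h","h2","hd","co","13c_o","c_18o","13c_18o","c","n","o","s","si","cs","cn",
   "hcn","hnc","oh","h2o","h2_18o","c2h","c_c3h2","so","cp","sp","hcop","chp","ohp","shp"]

def molecule_and_transition (line_name : String) : String × String :=
  -- the '"_" not in line_name: raise ValueError' guard is Pre_molecule_and_transition
  let t := PySem.Str.strip (PySem.Str.lower line_name)
  let prefixes := pyMoleculeKeys.filter (fun s => PySem.Str.startswith t s)
  if PySem.List.len prefixes == 0 then
    -- tuple(t.split('_', maxsplit=1)): under Pre_, '_' ∈ t, so exactly two pieces
    match PySem.Str.splitMax? t "_" 1 with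
    | none => (t, "")         -- unreachable ('_' is a nonempty separator)
    | some parts =>
      match parts with
      | [] => (t, "")         -- unreachable (split returns at least one piece)
      | a :: rest =>
        match rest with
        | [] => (t, "")       -- unreachable under Pre_ ('_' ∈ t, so two pieces)
        | b :: rest2 =>
          match rest2 with
          | [] => (a, b)
          | _ :: _ => (t, "") -- unreachable (maxsplit=1 yields at most two pieces)
  else
    let lens := prefixes.map (fun s => PySem.Str.len s)
    -- idxmax: max(range(len(lens)), key=lens.__getitem__); the range is nonempty here, so
    -- max? returns some and the .getD 0 / pyGetD defaults are unreachable
    let idx := (PySem.List.max? (PySem.List.pyRange 0 (PySem.List.len lens))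
                  (fun i => PySem.List.pyGetD lens i 0)).getD 0
    let pre := PySem.List.pyGetD prefixes idx ""
    let suffix := PySem.Str.slice t (some (PySem.Str.len pre + 1)) none
    (pre, suffix)

-- ===== PORT B =====
-- _KEYS = frozenset(_molecules_to_latex)
def pyMolKeySet : PySem.Set String :=
  PySem.Set.ofList
    ["h","h2","hd","co","13c_o","c_18o","13c_18o","c","n","o","s","si","cs","cn",
     "hcn","hnc","oh","h2o","h2_18o","c2h","c_c3h2","so","cp","sp","hcop","chp","ohp","shp"]

-- _MAXLEN = max(map(len, _KEYS))  (max with no key over set elements: order-independent)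
def pyMolMaxLen : Int :=
  (PySem.List.max? (pyMolKeySet.map PySem.Str.len) (fun x => x)).getD 0

-- the 'for k in range(min(len(line_name), _MAXLEN), 0, -1): if line_name[:k] in _KEYS: return …' loop
def pvFindPrefixLen (t : String) : List Int → Option Int
  | [] => none
  | k :: rest =>
    if PySem.Set.contains pyMolKeySet (PySem.Str.slice t none (some k)) then some k
    else pvFindPrefixLen t rest

def molecule_and_transition_alt (line_name : String) : String × String :=
  let t := PySem.Str.strip (PySem.Str.lower line_name)
  match pvFindPrefixLen t (PySem.List.pyRange (min (PySem.Str.len t) pyMolMaxLen) 0 (-1)) with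
  | some k => (PySem.Str.slice t none (some k), PySem.Str.slice t (some (k + 1)) none)
  | none =>
    match PySem.Str.splitMax? t "_" 1 with
    | some [a, b] => (a, b)
    | some [] => (t, "")              -- unreachable (split returns at least one piece)
    | some [_] => (t, "")             -- unreachable under Pre_ ('_' ∈ t, so two pieces)
    | some (_ :: _ :: _ :: _) => (t, "")  -- unreachable (maxsplit=1: at most two pieces)
    | none => (t, "")                 -- unreachable ('_' is a nonempty separator)

-- ===== PRECONDITION & SPEC =====
-- A raises ValueError exactly when '_' does not occur in the raw argument
def Pre_molecule_and_transition (line_name : String) : Prop :=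
  PySem.Str.isIn "_" line_name = true
instance (line_name : String) : Decidable (Pre_molecule_and_transition line_name) := by
  unfold Pre_molecule_and_transition; infer_instance

def pvWitness_molecule_and_transition : String := "co_1_0"

def Spec_molecule_and_transition (line_name : String) (out : String × String) : Prop := out = molecule_and_transition_alt line_name
instance (line_name : String) (out : String × String) : Decidable (Spec_molecule_and_transition line_name out) := by unfold Spec_molecule_and_transition; infer_instance

-- ===== CLAIM (what is proved, stated in full; the proofs are below) =====
def Claim_equal_molecule_and_transition : Prop := ∀ (line_name : String), Dom_molecule_and_transition line_name → Pre_molecule_and_transition line_name → Spec_molecule_and_transition line_name (molecule_and_transition line_name)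

-- ===== LEMMAS AND PROOFS =====

-- the distinct key literals: the frozenset's element list is A's key list
theorem keySet_eq : pyMolKeySet = pyMoleculeKeys := by decide

theorem maxLen_eq : pyMolMaxLen = 7 := by decide

-- every key is nonempty and at most 7 characters long
theorem key_len_bounds : ∀ s ∈ pyMoleculeKeys, 1 ≤ s.toList.length ∧ s.toList.length ≤ 7 := by decide

-- max? commutes with map (first-extremal is positionwise)
theorem max?_map_comm {α β κ : Type} [LT κ] [DecidableLT κ]
    (h : α → β) (key : β → κ) (l : List α) :
    PySem.List.max? (l.map h) key = (PySem.List.max? l (fun i => key (h i))).map h := by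
  unfold PySem.List.max?
  rw [List.foldl_map]
  suffices H : ∀ (acc : Option α),
      l.foldl (fun acc x =>
        match acc with
        | none => some (h x)
        | some m => if key m < key (h x) then some (h x) else some m) (acc.map h)
      = (l.foldl (fun acc x =>
        match acc with
        | none => some x
        | some m => if key (h m) < key (h x) then some x else some m) acc).map h by
    exact H none
  induction l with
  | nil => intro acc; rfl
  | cons x xs ih =>
    intro acc
    cases acc with
    | none => simpa using ih (some x)
    | some m =>
      by_cases hlt : key (h m) < key (h x)
      · simpa [hlt] using ih (some x)
      · simpa [hlt] using ih (some m)

-- A's idxmax-then-index equals the first-longest element of the filtered list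
theorem aidx_eq_max? (f : List String) :
    (PySem.List.max? (PySem.List.pyRange 0 (PySem.List.len (f.map (fun s => PySem.Str.len s))))
        (fun i => PySem.List.pyGetD (f.map (fun s => PySem.Str.len s)) i 0)).map
      (fun i => PySem.List.pyGetD f i "")
    = PySem.List.max? f PySem.Str.len := by
  have hkey : (fun i => PySem.List.pyGetD (f.map (fun s => PySem.Str.len s)) i 0)
      = fun i => PySem.Str.len (PySem.List.pyGetD f i "") := by
    funext i
    have := PySem.List.pyGetD_map (fun s => PySem.Str.len s) f i ""
    simpa using this
  rw [hkey, ← max?_map_comm (fun i => PySem.List.pyGetD f i "") PySem.Str.len]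
  have hlen : PySem.List.len (f.map (fun s => PySem.Str.len s)) = PySem.List.len f := by
    simp [PySem.List.len]
  rw [hlen]
  rw [PySem.List.map_pyGetD_pyRange_zero f ""]

-- a nonempty list has nonzero Python length
theorem len_beq_zero_false {α : Type} (l : List α) (h : l ≠ []) :
    (PySem.List.len l == 0) = false := by
  cases l with
  | nil => exact absurd rfl h
  | cons a t => simp [PySem.List.len]; omega

-- the membership test B's loop performs, as a proposition about A's key list
theorem contains_iff (t : String) (k : Int) :
    PySem.Set.contains pyMolKeySet (PySem.Str.slice t none (some k)) = true
    ↔ PySem.Str.slice t none (some k) ∈ pyMoleculeKeys := by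
  rw [keySet_eq]
  simp [PySem.Set.contains]

-- B's loop returns none when no admissible prefix length hits the key set
theorem findPrefix_none (t : String) :
    ∀ (n : Nat) (a : Int), a.toNat = n →
    (∀ j : Int, 0 < j → j ≤ a →
      PySem.Set.contains pyMolKeySet (PySem.Str.slice t none (some j)) = false) →
    pvFindPrefixLen t (PySem.List.pyRange a 0 (-1)) = none := by
  intro n
  induction n with
  | zero =>
    intro a ha _
    rw [PySem.List.pyRange_neg_one_eq_nil (by omega)]
    rfl
  | succ m ih =>
    intro a ha hall
    have hpos : (0:Int) < a := by omega
    rw [PySem.List.pyRange_neg_one_cons hpos]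
    show (if _ then _ else _) = _
    rw [if_neg (by rw [hall a hpos le_rfl]; simp)]
    exact ih (a - 1) (by omega) (fun j hj hja => hall j hj (by omega))

-- B's loop returns the largest admissible prefix length that hits the key set
theorem findPrefix_some (t : String) (k : Int) (hk : 0 < k)
    (hQ : PySem.Set.contains pyMolKeySet (PySem.Str.slice t none (some k)) = true) :
    ∀ (n : Nat) (a : Int), (a - k).toNat = n → k ≤ a →
    (∀ j : Int, k < j → j ≤ a →
      PySem.Set.contains pyMolKeySet (PySem.Str.slice t none (some j)) = false) →
    pvFindPrefixLen t (PySem.List.pyRange a 0 (-1)) = some k := by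
  intro n
  induction n with
  | zero =>
    intro a ha hka _
    have : a = k := by omega
    subst this
    rw [PySem.List.pyRange_neg_one_cons (by omega)]
    show (if _ then _ else _) = _
    rw [if_pos hQ]
  | succ m ih =>
    intro a ha hka hall
    have hak : k < a := by omega
    rw [PySem.List.pyRange_neg_one_cons (by omega)]
    show (if _ then _ else _) = _
    rw [if_neg (by rw [hall a hak le_rfl]; simp)]
    exact ih (a - 1) (by omega) (by omega) (fun j hj hja => hall j hj (by omega))

-- a key matches t exactly when it is the k-character slice of t for some admissible k
theorem slice_toList (t : String) (k : Int) (hk : 0 ≤ k) :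
    (PySem.Str.slice t none (some k)).toList = t.toList.take k.toNat := by
  simp only [PySem.Str.toList_slice, PySem.Chars.slice_eq_listSlice]
  exact PySem.List.slice_to _ hk

-- the k-character slice of t is a matching key as soon as the set lookup succeeds (0 < k ≤ |t|)
theorem slice_mem_filter (t : String) (j : Int) (hj0 : 0 < j) (hjt : j ≤ (t.toList.length : Int))
    (hQ : PySem.Set.contains pyMolKeySet (PySem.Str.slice t none (some j)) = true) :
    PySem.Str.slice t none (some j) ∈
      pyMoleculeKeys.filter (fun s => PySem.Str.startswith t s)
    ∧ (PySem.Str.slice t none (some j)).toList.length = j.toNat := by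
  have hmem : PySem.Str.slice t none (some j) ∈ pyMoleculeKeys := (contains_iff t j).mp hQ
  have htl : (PySem.Str.slice t none (some j)).toList = t.toList.take j.toNat :=
    slice_toList t j (le_of_lt hj0)
  have hpre : (PySem.Str.slice t none (some j)).toList <+: t.toList := by
    rw [htl]; exact List.take_prefix _ _
  have hsw : PySem.Str.startswith t (PySem.Str.slice t none (some j)) = true := by
    rw [PySem.Str.startswith_eq, PySem.Chars.startswith_iff]
    exact hpre
  refine ⟨List.mem_filter.mpr ⟨hmem, hsw⟩, ?_⟩
  rw [htl, List.length_take]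
  omega

-- ===== VERDICT (by name: the statement is the Claim_ definition above) =====
set_option maxHeartbeats 1000000 in
theorem molecule_and_transition_spec : Claim_equal_molecule_and_transition := by
  intro line_name _hdom _hpre
  unfold Spec_molecule_and_transition
  unfold molecule_and_transition molecule_and_transition_alt
  dsimp only
  set t := PySem.Str.strip (PySem.Str.lower line_name) with ht
  set f := pyMoleculeKeys.filter (fun s => PySem.Str.startswith t s) with hf
  rw [maxLen_eq]
  have hlt : PySem.Str.len t = (t.toList.length : Int) := rfl
  cases hb : PySem.List.max? f PySem.Str.len with
  | none =>
    have hfe : f = [] := (PySem.List.max?_eq_none_iff f PySem.Str.len).mp hb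
    -- B's loop finds nothing: any hit would be a matching key, contradicting f = []
    have hnone : pvFindPrefixLen t
        (PySem.List.pyRange (min (PySem.Str.len t) 7) 0 (-1)) = none := by
      apply findPrefix_none t (min (PySem.Str.len t) 7).toNat _ rfl
      intro j hj0 hja
      by_contra hc
      rw [Bool.not_eq_false] at hc
      have hjt : j ≤ (t.toList.length : Int) := by
        rw [hlt] at hja; omega
      have := (slice_mem_filter t j hj0 hjt hc).1
      rw [← hf, hfe] at this
      exact absurd this (List.not_mem_nil)
    rw [hnone, hfe]
    cases hsp : PySem.Str.splitMax? t "_" 1 with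
    | none => rfl
    | some parts => rcases parts with _ | ⟨a, _ | ⟨b, _ | _⟩⟩ <;> rfl
  | some m =>
    have hfe : f ≠ [] := by
      intro h; rw [h] at hb; simp [PySem.List.max?] at hb
    have hmf : m ∈ f := PySem.List.max?_mem hb
    obtain ⟨hmk, hsw⟩ := List.mem_filter.mp hmf
    have hpre : m.toList <+: t.toList := by
      rw [PySem.Str.startswith_eq, PySem.Chars.startswith_iff] at hsw
      exact hsw
    have hm : m.toList = t.toList.take m.toList.length := List.prefix_iff_eq_take.mp hpre
    have hdle : m.toList.length ≤ t.toList.length := hpre.length_le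
    obtain ⟨hd1, hd7⟩ := key_len_bounds m hmk
    have hlenm : PySem.Str.len m = (m.toList.length : Int) := rfl
    -- B's loop returns exactly |m|
    have hsome : pvFindPrefixLen t
        (PySem.List.pyRange (min (PySem.Str.len t) 7) 0 (-1)) = some (m.toList.length : Int) := by
      have hQ : PySem.Set.contains pyMolKeySet
          (PySem.Str.slice t none (some (m.toList.length : Int))) = true := by
        have htl : (PySem.Str.slice t none (some (m.toList.length : Int))).toList
            = t.toList.take m.toList.length := by
          rw [slice_toList t _ (Int.natCast_nonneg _)]; simp
        have : PySem.Str.slice t none (some (m.toList.length : Int)) = m :=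
          String.toList_inj.mp (by rw [htl, ← hm])
        rw [contains_iff, this]
        exact hmk
      apply findPrefix_some t _ (by exact_mod_cast hd1) hQ
          (min (PySem.Str.len t) 7 - (m.toList.length : Int)).toNat _ rfl
      · rw [hlt]; omega
      · intro j hjm hja
        by_contra hc
        rw [Bool.not_eq_false] at hc
        have hjt : j ≤ (t.toList.length : Int) := by rw [hlt] at hja; omega
        obtain ⟨hjf, hjlen⟩ := slice_mem_filter t j (by omega) hjt hc
        rw [← hf] at hjf
        have := PySem.List.max?_isMax hb _ hjf
        rw [hlenm] at this
        have hlj : PySem.Str.len (PySem.Str.slice t none (some j))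
            = ((PySem.Str.slice t none (some j)).toList.length : Int) := rfl
        rw [hlj, hjlen] at this
        omega
    rw [hsome]
    -- A's branch: nonempty prefix list, idxmax picks m
    have hlen0 : (PySem.List.len f == 0) = false := len_beq_zero_false f hfe
    rw [hlen0]
    have hmax := aidx_eq_max? f
    rw [hb] at hmax
    obtain ⟨i, hi, him⟩ := Option.map_eq_some_iff.mp hmax
    simp only [Bool.false_eq_true, if_false, hi, Option.getD_some, him]
    have hms : m = PySem.Str.slice t none (some (m.toList.length : Int)) := by
      apply String.toList_inj.mp
      rw [slice_toList t _ (Int.natCast_nonneg _)]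
      simpa using hm
    rw [hlenm, ← hms]
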